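-- pv_equiv track=rewrite | github.com/heei3k/heei3k4g | test/string2byte.py | bytes_to_hex
-- ===== SOURCE A (Python) =====
-- def bytes_to_hex(t):
--     n = []
--
--     for byte in t:
--         # 提取高4位并转换为十六进制
--
--         high_nibble = (byte >> 4) & 0x0F
--
--         n.append(hex(high_nibble)[2:])
--
--         # 提取低4位并转换为十六进制
--
--         low_nibble = byte & 0x0F
--
--         n.append(hex(low_nibble)[2:])
--
--         # 将列表中的元素拼接成一个字符串
--
--     return ''.join(n)
-- ===== SOURCE B (Python) =====
-- def bytes_to_hex(t):
--     return bytes(b & 0xFF for b in t).hex()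
-- ===== Notes on version B (the rewrite author's own statement) =====
-- stated objective: faster
-- what changed: A extracts the high and low nibbles of each element with shifts and masks and appends one hex-digit string at a time to a list it then joins; B masks each element to a byte once (b & 0xFF) and lets a single bytes(...).hex() library call emit both hex digits per byte.
import Mathlib
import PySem

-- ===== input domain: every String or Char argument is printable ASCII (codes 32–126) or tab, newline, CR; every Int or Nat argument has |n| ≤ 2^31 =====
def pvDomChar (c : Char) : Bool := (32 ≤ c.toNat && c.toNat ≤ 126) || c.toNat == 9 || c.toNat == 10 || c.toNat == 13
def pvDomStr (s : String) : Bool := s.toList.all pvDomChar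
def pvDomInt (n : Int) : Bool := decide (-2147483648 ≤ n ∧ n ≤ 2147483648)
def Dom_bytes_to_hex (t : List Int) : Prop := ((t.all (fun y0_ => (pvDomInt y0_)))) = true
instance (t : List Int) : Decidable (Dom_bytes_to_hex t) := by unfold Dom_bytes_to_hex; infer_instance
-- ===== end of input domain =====

-- B replaces A's per-nibble shift/mask/append loop by masking each element to a byte and
-- emitting both hex digits of that byte at once via one bytes(...).hex() call; objective: faster (measured, constant factor).

-- ===== PORT A =====
-- hex(n)[2:] for 0 ≤ n < 16 (the only values A feeds it): the single lowercase hex digit; exact on that range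
def pyHexSmall (n : Int) : String :=
  String.ofList [['0','1','2','3','4','5','6','7','8','9','a','b','c','d','e','f'].getD n.toNat '0']

def bytes_to_hex (t : List Int) : String :=
  PySem.Str.join "" (t.foldl (fun (n : List String) (byte : Int) =>
    (n ++ [pyHexSmall (PySem.Int.band (byte >>> (4:Nat)) 0x0F)])
        ++ [pyHexSmall (PySem.Int.band byte 0x0F)]) [])

-- ===== PORT B =====
-- the two hex characters bytes.hex emits for one byte value m ∈ [0, 256)
def pyByteHexChars (m : Int) : List Char :=
  [['0','1','2','3','4','5','6','7','8','9','a','b','c','d','e','f'].getD (m.toNat / 16) '0',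
   ['0','1','2','3','4','5','6','7','8','9','a','b','c','d','e','f'].getD (m.toNat % 16) '0']

def bytes_to_hex_alt (t : List Int) : String :=
  String.ofList ((t.map (fun (b : Int) => PySem.Int.band b 0xFF)).flatMap pyByteHexChars)

-- ===== PRECONDITION & SPEC =====
def Spec_bytes_to_hex (t : List Int) (out : String) : Prop := out = bytes_to_hex_alt t
instance (t : List Int) (out : String) : Decidable (Spec_bytes_to_hex t out) := by unfold Spec_bytes_to_hex; infer_instance

-- ===== CLAIM (what is proved, stated in full; the proofs are below) =====
def Claim_equal_bytes_to_hex : Prop := ∀ (t : List Int), Dom_bytes_to_hex t → Spec_bytes_to_hex t (bytes_to_hex t)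

-- ===== LEMMAS AND PROOFS =====
theorem nat_and15 (n : Nat) : n &&& 15 = n % 16 := by
  simpa using Nat.and_two_pow_sub_one_eq_mod n 4

theorem band15 (b : Int) : PySem.Int.band b 15 = b % 16 := by
  unfold PySem.Int.band
  split_ifs with h1 h2 h2
  · rw [show ((15:Int).toNat) = 15 from rfl, nat_and15]; omega
  · omega
  · rw [show ((15:Int).toNat) = 15 from rfl, Nat.and_comm, nat_and15]
    have := Nat.mod_lt (-b-1).toNat (y := 16) (by omega); omega
  · omega

theorem band255 (b : Int) : PySem.Int.band b 255 = b % 256 := by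
  unfold PySem.Int.band
  split_ifs with h1 h2 h2
  · rw [show ((255:Int).toNat) = 255 from rfl, show (255:Nat) = 2^8-1 from rfl,
        Nat.and_two_pow_sub_one_eq_mod]; omega
  · omega
  · rw [show ((255:Int).toNat) = 255 from rfl, Nat.and_comm, show (255:Nat) = 2^8-1 from rfl,
        Nat.and_two_pow_sub_one_eq_mod]
    have := Nat.mod_lt (-b-1).toNat (y := 256) (by omega); omega
  · omega

theorem shift4 (b : Int) : b >>> (4:Nat) = b / 16 := by
  simpa using Int.shiftRight_eq_div_pow b 4

-- A's two appended digit strings for one element are exactly B's two characters for its byte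
theorem perByte (b : Int) :
    [pyHexSmall (PySem.Int.band (b >>> (4:Nat)) 0x0F), pyHexSmall (PySem.Int.band b 0x0F)]
      = (pyByteHexChars (PySem.Int.band b 0xFF)).map (fun c => String.ofList [c]) := by
  simp only [pyHexSmall, pyByteHexChars, band255, band15, shift4, List.map]
  have h1 : (b / 16 % 16).toNat = (b % 256).toNat / 16 := by omega
  have h2 : (b % 16).toNat = (b % 256).toNat % 16 := by omega
  rw [h1, h2]

-- A's accumulator loop flattens to a flatMap
theorem foldA (t : List Int) (acc : List String) :
    t.foldl (fun (n : List String) (byte : Int) =>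
      (n ++ [pyHexSmall (PySem.Int.band (byte >>> (4:Nat)) 0x0F)])
          ++ [pyHexSmall (PySem.Int.band byte 0x0F)]) acc
    = acc ++ t.flatMap (fun (b : Int) =>
        [pyHexSmall (PySem.Int.band (b >>> (4:Nat)) 0x0F), pyHexSmall (PySem.Int.band b 0x0F)]) := by
  simp [List.append_assoc, List.flatMap]

-- ===== VERDICT (by name: the statement is the Claim_ definition above) =====
theorem bytes_to_hex_spec : Claim_equal_bytes_to_hex := by
  intro t _
  unfold Spec_bytes_to_hex bytes_to_hex bytes_to_hex_alt
  rw [foldA, List.nil_append]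
  have hchars : (t.flatMap (fun (b : Int) =>
      [pyHexSmall (PySem.Int.band (b >>> (4:Nat)) 0x0F), pyHexSmall (PySem.Int.band b 0x0F)]))
      = ((t.map (fun (b : Int) => PySem.Int.band b 0xFF)).flatMap pyByteHexChars).map (fun c => String.ofList [c]) := by
    simp only [List.flatMap_map, List.map_flatMap]
    exact List.flatMap_congr (fun b _ => perByte b)
  rw [hchars]
  apply String.toList_inj.mp
  rw [PySem.Str.toList_join]
  simp only [List.map_map, Function.comp_def, String.toList_ofList]
  exact PySem.Chars.join_nil_singletons _
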